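-- pv_equiv track=rewrite | github.com/wilmurillo-ai/Design-Assistant | .skills/openclaw-skills/skills/cassh100k/agentnet/registry.py | _flatten_unique
-- ===== SOURCE A (Python) =====
-- def _flatten_unique(lists: list[list]) -> list:
--     seen = set()
--     result = []
--     for lst in lists:
--         for item in lst:
--             if item not in seen:
--                 seen.add(item)
--                 result.append(item)
--     return sorted(result)
-- ===== SOURCE B (Python) =====
-- def _flatten_unique(lists: list[list]) -> list:
--     flat = [x for lst in lists for x in lst]
--     flat.sort()
--     out = []
--     for x in flat:
--         if not out or out[-1] != x:
--             out.append(x)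
--     return out
-- ===== Notes on version B (the rewrite author's own statement) =====
-- stated objective: alternative
-- what changed: Replaces the hash-set membership dedup before sorting with a flatten, one sort, and a single linear adjacency-dedup pass over the sorted list.
import Mathlib
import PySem

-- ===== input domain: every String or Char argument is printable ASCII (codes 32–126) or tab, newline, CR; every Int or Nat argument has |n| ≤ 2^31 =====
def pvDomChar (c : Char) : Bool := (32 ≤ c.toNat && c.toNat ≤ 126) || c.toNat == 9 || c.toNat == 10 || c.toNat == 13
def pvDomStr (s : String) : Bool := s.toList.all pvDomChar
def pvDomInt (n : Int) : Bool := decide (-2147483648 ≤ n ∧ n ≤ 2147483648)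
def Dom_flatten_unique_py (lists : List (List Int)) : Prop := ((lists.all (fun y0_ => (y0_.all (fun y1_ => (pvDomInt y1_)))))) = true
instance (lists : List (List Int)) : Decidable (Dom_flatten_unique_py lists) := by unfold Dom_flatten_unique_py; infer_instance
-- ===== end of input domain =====

-- B flattens, sorts once, then deduplicates by a single adjacency scan, instead of A's
-- set-membership dedup before sorting; same cost, different decomposition (objective: alternative).

-- ===== PORT A =====
def flatten_unique_py (lists : List (List Int)) : List Int :=
  let st := lists.foldl (fun st lst =>
    lst.foldl (fun st item =>
      if PySem.Set.contains st.1 item then st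
      else (PySem.Set.add st.1 item, st.2 ++ [item])) st)
    ((PySem.Set.empty : PySem.Set Int), ([] : List Int))
  PySem.List.sorted st.2 (fun x => x) false

-- ===== PORT B =====
def flatten_unique_py_alt (lists : List (List Int)) : List Int :=
  let flat := lists.flatMap (fun lst => lst)
  let flat := PySem.List.sorted flat (fun x => x) false
  flat.foldl (fun out x => if out.getLast? ≠ some x then out ++ [x] else out) []

-- ===== PRECONDITION & SPEC =====
def Spec_flatten_unique_py (lists : List (List Int)) (out : List Int) : Prop := out = flatten_unique_py_alt lists
instance (lists : List (List Int)) (out : List Int) : Decidable (Spec_flatten_unique_py lists out) := by unfold Spec_flatten_unique_py; infer_instance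

-- ===== CLAIM (what is proved, stated in full; the proofs are below) =====
def Claim_equal_flatten_unique_py : Prop := ∀ (lists : List (List Int)), Dom_flatten_unique_py lists → Spec_flatten_unique_py lists (flatten_unique_py lists)

-- ===== LEMMAS AND PROOFS =====

-- A's inner loop keeps seen = result (as lists) and both equal the Set.add fold.
theorem aInner (lst : List Int) (s : List Int) :
    lst.foldl (fun st item =>
      if PySem.Set.contains st.1 item then st
      else (PySem.Set.add st.1 item, st.2 ++ [item])) (s, s)
    = (lst.foldl PySem.Set.add s, lst.foldl PySem.Set.add s) := by
  induction lst generalizing s with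
  | nil => rfl
  | cons a t ih =>
    simp only [List.foldl_cons]
    by_cases h : PySem.Set.contains s a = true
    · rw [if_pos h, show PySem.Set.add s a = s from by unfold PySem.Set.add; rw [if_pos h]]
      exact ih s
    · rw [if_neg h, show PySem.Set.add s a = s ++ [a] from by unfold PySem.Set.add; rw [if_neg h]]
      exact ih (s ++ [a])

theorem aOuter (lists : List (List Int)) (s : List Int) :
    lists.foldl (fun st lst =>
      lst.foldl (fun st item =>
        if PySem.Set.contains st.1 item then st
        else (PySem.Set.add st.1 item, st.2 ++ [item])) st) (s, s)
    = (lists.foldl (fun s lst => lst.foldl PySem.Set.add s) s,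
       lists.foldl (fun s lst => lst.foldl PySem.Set.add s) s) := by
  induction lists generalizing s with
  | nil => rfl
  | cons l t ih => simp only [List.foldl_cons, aInner]; exact ih _

-- every element of a strictly increasing list is ≤ its last element
theorem le_getLast?_of_pairwise_lt (acc : List Int) (h : acc.Pairwise (· < ·))
    (a : Int) (ha : a ∈ acc) (m : Int) (hm : acc.getLast? = some m) : a ≤ m := by
  induction acc with
  | nil => cases ha
  | cons c cs ih =>
    cases cs with
    | nil =>
      simp at ha hm; omega
    | cons d ds =>
      have hm' : (d :: ds).getLast? = some m := by
        simpa using hm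
      have hmem : m ∈ d :: ds := List.mem_of_getLast? hm'
      rcases List.mem_cons.mp ha with rfl | ha'
      · exact le_of_lt ((List.pairwise_cons.mp h).1 m hmem)
      · exact ih (List.pairwise_cons.mp h).2 ha' hm'

-- B's adjacency scan on a ≤-sorted list: strictly increasing output, membership preserved.
theorem dedInv (l : List Int) (acc : List Int)
    (hacc : acc.Pairwise (· < ·))
    (hcross : ∀ b ∈ l, ∀ m, acc.getLast? = some m → m ≤ b)
    (hl : l.Pairwise (· ≤ ·)) :
    (l.foldl (fun out x => if out.getLast? ≠ some x then out ++ [x] else out) acc).Pairwise (· < ·)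
    ∧ ∀ x, x ∈ l.foldl (fun out x => if out.getLast? ≠ some x then out ++ [x] else out) acc
            ↔ x ∈ acc ∨ x ∈ l := by
  induction l generalizing acc with
  | nil => simpa using hacc
  | cons b t ih =>
    simp only [List.foldl_cons]
    by_cases h : acc.getLast? = some b
    · have hb : b ∈ acc := List.mem_of_getLast? h
      have := ih acc hacc
        (fun b' hb' m hm => (hcross b' (List.mem_cons_of_mem _ hb') m hm))
        (List.pairwise_cons.mp hl).2
      refine ⟨by simpa [h] using this.1, fun x => ?_⟩
      have hx := this.2 x
      simp only [h, ne_eq, not_true_eq_false, if_false] at *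
      constructor
      · intro hm; rcases hx.mp hm with h1 | h1
        · exact Or.inl h1
        · exact Or.inr (List.mem_cons_of_mem _ h1)
      · intro hm; rcases hm with h1 | h1
        · exact hx.mpr (Or.inl h1)
        · rcases List.mem_cons.mp h1 with rfl | h2
          · exact hx.mpr (Or.inl hb)
          · exact hx.mpr (Or.inr h2)
    · -- append case
      have hlt : ∀ a ∈ acc, a < b := by
        intro a ha
        cases hLast : acc.getLast? with
        | none => simp [List.getLast?_eq_none_iff.mp hLast] at ha
        | some m =>
          have ham := le_getLast?_of_pairwise_lt acc hacc a ha m hLast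
          have hmb := hcross b (List.mem_cons_self) m hLast
          have : m ≠ b := fun he => h (by rw [hLast, he])
          omega
      have hacc' : (acc ++ [b]).Pairwise (· < ·) := by
        rw [List.pairwise_append]
        exact ⟨hacc, by simp, by simpa using hlt⟩
      have hcross' : ∀ b' ∈ t, ∀ m, (acc ++ [b]).getLast? = some m → m ≤ b' := by
        intro b' hb' m hm
        have : b = m := by simpa [List.getLast?_concat] using hm
        subst this
        exact (List.pairwise_cons.mp hl).1 b' hb'
      have := ih (acc ++ [b]) hacc' hcross' (List.pairwise_cons.mp hl).2
      refine ⟨by simpa [h] using this.1, fun x => ?_⟩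
      have hx := this.2 x
      simp only [h, ne_eq, not_false_eq_true, if_true] at *
      constructor
      · intro hm; rcases hx.mp hm with h1 | h1
        · rcases List.mem_append.mp h1 with h2 | h2
          · exact Or.inl h2
          · simp at h2; subst h2; exact Or.inr List.mem_cons_self
        · exact Or.inr (List.mem_cons_of_mem _ h1)
      · intro hm; rcases hm with h1 | h1
        · exact hx.mpr (Or.inl (List.mem_append.mpr (Or.inl h1)))
        · rcases List.mem_cons.mp h1 with rfl | h2
          · exact hx.mpr (Or.inl (by simp))
          · exact hx.mpr (Or.inr h2)

-- ===== VERDICT (by name: the statement is the Claim_ definition above) =====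
theorem flatten_unique_py_spec : Claim_equal_flatten_unique_py := by
  intro lists _
  show flatten_unique_py lists = flatten_unique_py_alt lists
  simp only [flatten_unique_py, flatten_unique_py_alt]
  rw [show (PySem.Set.empty : PySem.Set Int) = ([] : List Int) from rfl, aOuter]
  set flat := lists.flatMap (fun lst => lst) with hflat
  have hres : lists.foldl (fun s lst => lst.foldl PySem.Set.add s) [] = PySem.Set.ofList flat := by
    rw [PySem.Set.ofList_eq_foldl, hflat]
    have : lists.flatMap (fun lst => lst) = lists.flatten := by simp
    rw [this, List.foldl_flatten]
  rw [hres]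
  set srt := PySem.List.sorted flat (fun x => x) false with hsrt
  have hsp : srt.Pairwise (· ≤ ·) := by
    simpa using PySem.List.sorted_pairwise flat (fun x => x)
  have hded := dedInv srt [] (by simp) (by simp) hsp
  set ded := srt.foldl (fun out x => if out.getLast? ≠ some x then out ++ [x] else out) [] with hdd
  apply PySem.List.sorted_eq_of_perm_of_pairwise_lt
  · -- ded.Perm (Set.ofList flat)
    apply List.perm_of_nodup_nodup_toFinset_eq
    · exact hded.1.imp ne_of_lt
    · exact PySem.Set.nodup_ofList flat
    · ext x
      simp only [List.mem_toFinset]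
      rw [hded.2 x]
      simp [PySem.Set.mem_ofList, hsrt, PySem.List.mem_sorted]
  · simpa using hded.1
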